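-- pv_equiv track=rewrite | github.com/lana0415/DSC180A_Q1 | luigi_permute/run_luigi.py | generate_conditions
-- ===== SOURCE A (Python) =====
-- import itertools
--
-- def generate_conditions(conditions_dict):
--     # Generate all combinations of conditions
--     condition_keys = []
--     condition_values = []
--
--     for condition in conditions_dict:
--         for key, values in condition.items():
--             condition_keys.append(key)
--             condition_values.append(values)
--
--     combinations = list(itertools.product(*condition_values))
--
--     conditions_list = []
--     for combo in combinations:
--         condition = dict(zip(condition_keys, combo))
--         conditions_list.append(condition)
--     return conditions_list
-- ===== SOURCE B (Python) =====
-- def generate_conditions(conditions_dict):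
--     result = [{}]
--     for condition in conditions_dict:
--         for key, values in condition.items():
--             result = [dict(d, **{key: v}) for d in result for v in values]
--     return result
-- ===== Notes on version B (the rewrite author's own statement) =====
-- stated objective: simpler
-- what changed: Replaced the three-phase build (collect keys/values lists, itertools.product, zip each combo back into a dict) by a single incremental accumulator: seed with a single empty dict and for each (key, values) pair extend every partial dict with every value.
import Mathlib
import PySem

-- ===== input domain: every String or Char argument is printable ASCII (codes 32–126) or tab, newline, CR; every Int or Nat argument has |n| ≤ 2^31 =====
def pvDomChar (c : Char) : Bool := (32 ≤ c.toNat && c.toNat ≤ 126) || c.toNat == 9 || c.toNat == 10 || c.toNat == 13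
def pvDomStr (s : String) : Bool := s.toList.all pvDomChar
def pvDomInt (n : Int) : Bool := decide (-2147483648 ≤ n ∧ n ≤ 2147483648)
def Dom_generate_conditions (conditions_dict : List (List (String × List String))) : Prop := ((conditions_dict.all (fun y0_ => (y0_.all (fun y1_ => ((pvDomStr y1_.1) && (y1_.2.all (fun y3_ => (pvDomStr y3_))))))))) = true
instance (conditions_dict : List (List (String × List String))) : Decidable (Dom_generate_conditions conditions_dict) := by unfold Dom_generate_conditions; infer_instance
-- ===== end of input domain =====

-- B replaces A's collect-keys/values + itertools.product + zip-into-dict pipeline by one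
-- incremental accumulator seeded with a single empty dict; objective: simpler.

-- ===== PORT A =====
-- port of itertools.product(*lists) as a list of lists (first list varies slowest)
def pyProduct {α : Type} : List (List α) → List (List α)
  | [] => [[]]
  | l :: ls => l.flatMap (fun a => (pyProduct ls).map (a :: ·))

def generate_conditions (conditions_dict : List (List (String × List String))) : List (List (String × String)) :=
  -- the two append-loops building condition_keys / condition_values
  let kv := conditions_dict.foldl
    (fun (acc : List String × List (List String)) condition =>
      condition.foldl (fun a p => (a.1 ++ [p.1], a.2 ++ [p.2])) acc)
    (([], []) : List String × List (List String))
  let combinations := pyProduct kv.2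
  -- for combo in combinations: conditions_list.append(dict(zip(condition_keys, combo)))
  combinations.foldl
    (fun acc combo => acc ++ [(PySem.Dict.ofList (kv.1.zip combo)).items])
    ([] : List (List (String × String)))

-- ===== PORT B =====
def generate_conditions_alt (conditions_dict : List (List (String × List String))) : List (List (String × String)) :=
  let result : List (PySem.Dict String String) := [PySem.Dict.empty]
  (conditions_dict.foldl
    (fun result condition =>
      condition.foldl
        (fun result p => result.flatMap (fun d => p.2.map (fun v => d.insert p.1 v)))
        result)
    result).map PySem.Dict.items

-- ===== PRECONDITION & SPEC =====
def Spec_generate_conditions (conditions_dict : List (List (String × List String))) (out : List (List (String × String))) : Prop := out = generate_conditions_alt conditions_dict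
instance (conditions_dict : List (List (String × List String))) (out : List (List (String × String))) : Decidable (Spec_generate_conditions conditions_dict out) := by unfold Spec_generate_conditions; infer_instance

-- ===== CLAIM (what is proved, stated in full; the proofs are below) =====
def Claim_equal_generate_conditions : Prop := ∀ (conditions_dict : List (List (String × List String))), Dom_generate_conditions conditions_dict → Spec_generate_conditions conditions_dict (generate_conditions conditions_dict)

-- ===== LEMMAS AND PROOFS =====

-- A's inner key/value-collecting loop over one condition, with arbitrary accumulators
theorem kv_inner (cond : List (String × List String)) (k0 : List String) (v0 : List (List String)) :
    cond.foldl (fun a p => (a.1 ++ [p.1], a.2 ++ [p.2])) (k0, v0)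
      = (k0 ++ cond.map Prod.fst, v0 ++ cond.map Prod.snd) := by
  induction cond generalizing k0 v0 with
  | nil => simp
  | cons h t ih => simp [List.foldl_cons, ih]

-- A's outer loop flattens to the concatenation of all conditions
theorem kv_outer (cd : List (List (String × List String))) (k0 : List String) (v0 : List (List String)) :
    cd.foldl (fun (acc : List String × List (List String)) condition =>
        condition.foldl (fun a p => (a.1 ++ [p.1], a.2 ++ [p.2])) acc) (k0, v0)
      = (k0 ++ (cd.flatMap id).map Prod.fst, v0 ++ (cd.flatMap id).map Prod.snd) := by
  induction cd generalizing k0 v0 with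
  | nil => simp
  | cons h t ih => simp [List.foldl_cons, kv_inner, ih]

-- B's double loop is a single fold over the flattened pair list
theorem b_flatten (cd : List (List (String × List String)))
    (ds : List (PySem.Dict String String)) :
    cd.foldl (fun result condition =>
        condition.foldl
          (fun result p => result.flatMap (fun d => p.2.map (fun v => d.insert p.1 v)))
          result) ds
      = (cd.flatMap id).foldl
          (fun result p => result.flatMap (fun d => p.2.map (fun v => d.insert p.1 v))) ds := by
  induction cd generalizing ds with
  | nil => rfl
  | cons h t ih => simp [List.foldl_cons, List.foldl_append, ih]

-- the accumulator invariant: B's fold over the pair list equals, for each start dict,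
-- the product of the value lists zipped back with the keys
theorem main_inv (ps : List (String × List String)) (ds : List (PySem.Dict String String)) :
    ps.foldl (fun result p => result.flatMap (fun d => p.2.map (fun v => d.insert p.1 v))) ds
      = ds.flatMap (fun d => (pyProduct (ps.map Prod.snd)).map
          (fun combo => ((ps.map Prod.fst).zip combo).foldl (fun d q => d.insert q.1 q.2) d)) := by
  induction ps generalizing ds with
  | nil => simp [pyProduct]
  | cons h t ih =>
    rw [List.foldl_cons, ih, List.flatMap_assoc]
    congr 1
    funext d
    simp only [pyProduct, List.map_cons, List.flatMap_map, List.map_flatMap, List.map_map]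
    congr 1

-- ===== VERDICT (by name: the statement is the Claim_ definition above) =====
theorem generate_conditions_spec : Claim_equal_generate_conditions := by
  intro cd _
  unfold Spec_generate_conditions
  simp only [generate_conditions, generate_conditions_alt]
  rw [b_flatten, main_inv, kv_outer, PySem.List.foldl_append_singleton_eq_map]
  simp [PySem.Dict.ofList, PySem.Dict.update, Function.comp]
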